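-- pv_equiv track=rewrite | github.com/KMnO4-158/multiplied | multiplied/core/truth.py | truth_scope
-- ===== SOURCE A (Python) =====
-- from collections.abc import Generator
--
-- def truth_scope(
--     domain_: tuple[int, int], range_: tuple[int, int]
-- ) -> Generator[tuple[int, int]]:
--     """Yields (a, b) from domain such that it's product (ab) lies within range
--
--     Parameters
--     ----------
--     domain_: tuple[int,int]
--         The maximum range of values operands a and b can be.
--
--     range_: tuple[int,int]
--         Limit a and b to range_min <= a * b <= range_max
--
--     Yields
--     ------
--     tuple:
--         (operand_a, operand_b)
--     """
--
--     if not all([isinstance(d, int) for d in domain_]):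
--         raise TypeError("Domain must be a tuple of integers.")
--     if not all([isinstance(r, int) for r in range_]):
--         raise TypeError("Range must be a tuple of integers.")
--
--     min_in, max_in = domain_
--     min_out, max_out = range_
--
--     if min_in <= 0 or min_out <= 0:
--         raise ValueError("Minimum input and output values must be greater than zero.")
--     if (min_in > max_in) or (min_out > max_out):
--         raise ValueError(
--             f"Domain: {domain_} and range: {range_} must satisfy a <= b and c <= d."
--         )
--
--     if max_in**2 < min_out:
--         raise ValueError(f"Range {range_} unreachable for the input domain {domain_}")
--
--     # if min_out < min_in:
--     #     warnings.warn(
--     #         f"Loose domain and range alignment: min_out < min_in [{min_out} < {min_in}]"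
--     #     )
--     # if max_out < max_in:
--     #     warnings.warn(
--     #         f"Loose domain and range alignment: min_out < max_in [{max_out} < {max_in}]"
--     #     )
--
--     x = min_in
--     while x <= max_in:
--         lower_bound = min_in
--         if min_out // x >= min_in:
--             lower_bound = min_out // x
--
--         upper_bound = max_in
--         if max_out // x <= max_in:
--             upper_bound = max_out // x
--
--         # lower_bound = min_out // x if min_out // x >= min_in else min_in
--         # upper_bound = max_out // x if max_out // x <= max_in else max_in
--         for y in range(lower_bound, upper_bound + 1):
--             prod = x * y
--             if min_out <= prod <= max_out:
--                 yield (x, y)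
--             if max_out < prod:
--                 break
--         x += 1
-- ===== SOURCE B (Python) =====
-- def truth_scope(domain_, range_):
--     """Yields (a, b) from domain such that its product lies within range.
--
--     Same validation as the original; the bound computation and early break are
--     replaced by a plain full nested scan with a range test."""
--
--     if not all([isinstance(d, int) for d in domain_]):
--         raise TypeError("Domain must be a tuple of integers.")
--     if not all([isinstance(r, int) for r in range_]):
--         raise TypeError("Range must be a tuple of integers.")
--
--     min_in, max_in = domain_
--     min_out, max_out = range_
--
--     if min_in <= 0 or min_out <= 0:
--         raise ValueError("Minimum input and output values must be greater than zero.")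
--     if (min_in > max_in) or (min_out > max_out):
--         raise ValueError(
--             f"Domain: {domain_} and range: {range_} must satisfy a <= b and c <= d."
--         )
--
--     if max_in**2 < min_out:
--         raise ValueError(f"Range {range_} unreachable for the input domain {domain_}")
--
--     for x in range(min_in, max_in + 1):
--         for y in range(min_in, max_in + 1):
--             if min_out <= x * y <= max_out:
--                 yield (x, y)
-- ===== Notes on version B (the rewrite author's own statement) =====
-- stated objective: simpler
-- what changed: The division-derived per-x bounds (min_out//x, max_out//x) and the early break are removed: B scans the full y range for every x and keeps pairs by a direct min_out <= x*y <= max_out test; validation guards are unchanged.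
import Mathlib
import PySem

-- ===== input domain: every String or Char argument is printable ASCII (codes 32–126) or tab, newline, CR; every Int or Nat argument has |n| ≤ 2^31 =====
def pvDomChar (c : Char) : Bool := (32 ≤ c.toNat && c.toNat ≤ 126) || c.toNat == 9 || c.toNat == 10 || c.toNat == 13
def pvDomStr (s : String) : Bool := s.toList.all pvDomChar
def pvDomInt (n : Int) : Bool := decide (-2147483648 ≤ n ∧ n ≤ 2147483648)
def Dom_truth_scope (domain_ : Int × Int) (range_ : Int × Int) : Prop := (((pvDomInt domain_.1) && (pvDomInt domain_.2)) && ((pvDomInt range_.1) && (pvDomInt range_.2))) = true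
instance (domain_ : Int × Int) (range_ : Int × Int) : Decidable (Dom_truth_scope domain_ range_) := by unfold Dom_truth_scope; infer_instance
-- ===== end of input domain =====

-- B replaces the division-derived per-x loop bounds and the early break by a plain
-- full nested scan with a direct range test (objective: simpler); validation unchanged.
-- Both Pythons are generators; the ports return the list of yielded pairs.

-- ===== PORT A =====
-- inner 'for y in range(lower_bound, upper_bound+1)' with yield-check then break
def truthInnerA (x min_out max_out : Int) : List Int → List (Int × Int)
  | [] => []
  | y :: ys =>
    let prod := x * y
    let here := if min_out ≤ prod ∧ prod ≤ max_out then [(x, y)] else []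
    if max_out < prod then here else here ++ truthInnerA x min_out max_out ys

-- the 'while x <= max_in' loop
def truthOuterA (min_in max_in min_out max_out x : Int) : List (Int × Int) :=
  if _h : x ≤ max_in then
    truthInnerA x min_out max_out
      (PySem.List.pyRange
        (if min_in ≤ PySem.Int.floordiv min_out x then PySem.Int.floordiv min_out x else min_in)
        ((if PySem.Int.floordiv max_out x ≤ max_in then PySem.Int.floordiv max_out x else max_in) + 1) 1)
      ++ truthOuterA min_in max_in min_out max_out (x + 1)
  else []
termination_by (max_in + 1 - x).toNat
decreasing_by omega

def truth_scope (domain_ : Int × Int) (range_ : Int × Int) : List (Int × Int) :=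
  let min_in := domain_.1
  let max_in := domain_.2
  let min_out := range_.1
  let max_out := range_.2
  -- the three ValueError guards of A; a raise yields no value, excluded by Pre_
  if min_in ≤ 0 ∨ min_out ≤ 0 then []
  else if min_in > max_in ∨ min_out > max_out then []
  else if max_in ^ 2 < min_out then []
  else truthOuterA min_in max_in min_out max_out min_in

-- ===== PORT B =====
def truth_scope_alt (domain_ : Int × Int) (range_ : Int × Int) : List (Int × Int) :=
  let min_in := domain_.1
  let max_in := domain_.2
  let min_out := range_.1
  let max_out := range_.2
  if min_in ≤ 0 ∨ min_out ≤ 0 then []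
  else if min_in > max_in ∨ min_out > max_out then []
  else if max_in ^ 2 < min_out then []
  else
    (PySem.List.pyRange min_in (max_in + 1) 1).flatMap (fun x =>
      ((PySem.List.pyRange min_in (max_in + 1) 1).filter
        (fun y => decide (min_out ≤ x * y ∧ x * y ≤ max_out))).map (fun y => (x, y)))

-- ===== PRECONDITION & SPEC =====
-- Pre_ excludes exactly the inputs where A raises (ValueError on nonpositive minima,
-- inverted bounds, or an unreachable range); A returns normally everywhere else.
def Pre_truth_scope (domain_ : Int × Int) (range_ : Int × Int) : Prop :=
  0 < domain_.1 ∧ 0 < range_.1 ∧ domain_.1 ≤ domain_.2 ∧ range_.1 ≤ range_.2 ∧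
    range_.1 ≤ domain_.2 ^ 2
instance (domain_ : Int × Int) (range_ : Int × Int) : Decidable (Pre_truth_scope domain_ range_) := by unfold Pre_truth_scope; infer_instance

def pvWitness_truth_scope : (Int × Int) × (Int × Int) := ((2, 5), (6, 20))

def Spec_truth_scope (domain_ : Int × Int) (range_ : Int × Int) (out : List (Int × Int)) : Prop := out = truth_scope_alt domain_ range_
instance (domain_ : Int × Int) (range_ : Int × Int) (out : List (Int × Int)) : Decidable (Spec_truth_scope domain_ range_ out) := by unfold Spec_truth_scope; infer_instance

-- ===== CLAIM (what is proved, stated in full; the proofs are below) =====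
def Claim_equal_truth_scope : Prop := ∀ (domain_ : Int × Int) (range_ : Int × Int), Dom_truth_scope domain_ range_ → Pre_truth_scope domain_ range_ → Spec_truth_scope domain_ range_ (truth_scope domain_ range_)

-- ===== LEMMAS AND PROOFS =====

-- when no element triggers the break, the inner loop is a filter-then-map
lemma innerA_no_break (x min_out max_out : Int) :
    ∀ ys : List Int, (∀ y ∈ ys, x * y ≤ max_out) →
      truthInnerA x min_out max_out ys =
        (ys.filter (fun y => decide (min_out ≤ x * y ∧ x * y ≤ max_out))).map (fun y => (x, y)) := by
  intro ys
  induction ys with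
  | nil => intro _; rfl
  | cons y ys ih =>
    intro h
    have hy : x * y ≤ max_out := h y (by simp)
    simp only [truthInnerA, List.filter_cons]
    rw [if_neg (by omega)]
    by_cases hc : min_out ≤ x * y ∧ x * y ≤ max_out
    · simp [hc, ih (fun z hz => h z (by simp [hz]))]
    · simp [hc, ih (fun z hz => h z (by simp [hz]))]

-- the bounded inner loop of A equals the full filtered scan of B, for one x
lemma perx_eq (min_in max_in min_out max_out x : Int)
    (hx : 0 < x) :
    truthInnerA x min_out max_out
      (PySem.List.pyRange
        (if min_in ≤ PySem.Int.floordiv min_out x then PySem.Int.floordiv min_out x else min_in)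
        ((if PySem.Int.floordiv max_out x ≤ max_in then PySem.Int.floordiv max_out x else max_in) + 1) 1) =
    ((PySem.List.pyRange min_in (max_in + 1) 1).filter
      (fun y => decide (min_out ≤ x * y ∧ x * y ≤ max_out))).map (fun y => (x, y)) := by
  set fm := PySem.Int.floordiv min_out x with hfmdef
  set fM := PySem.Int.floordiv max_out x with hfMdef
  set L : Int := if min_in ≤ fm then fm else min_in with hL
  set U : Int := if fM ≤ max_in then fM else max_in with hU
  have hfmle : ∀ q : Int, q ≤ fm ↔ q * x ≤ min_out := fun q =>
    PySem.Int.le_floordiv_iff_mul_le hx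
  have hfMle : ∀ q : Int, q ≤ fM ↔ q * x ≤ max_out := fun q =>
    PySem.Int.le_floordiv_iff_mul_le hx
  have hLmin : min_in ≤ L := by rw [hL]; split_ifs <;> omega
  have hUfM : U ≤ fM := by rw [hU]; split_ifs <;> omega
  have hUmax : U ≤ max_in := by rw [hU]; split_ifs <;> omega
  -- every element of the bounded range keeps the product ≤ max_out: no break fires
  have hnb : ∀ y ∈ PySem.List.pyRange L (U + 1) 1, x * y ≤ max_out := by
    intro y hy
    rw [PySem.List.mem_pyRange_one] at hy
    have : y * x ≤ max_out := (hfMle y).mp (by omega)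
    nlinarith
  rw [innerA_no_break x min_out max_out _ hnb]
  -- any y satisfying the product condition lies in [L, U]
  have hin : ∀ y : Int, min_out ≤ x * y → x * y ≤ max_out → min_in ≤ y → y ≤ max_in →
      L ≤ y ∧ y ≤ U := by
    intro y h1 h2 h0 h3
    have hyfM : y ≤ fM := (hfMle y).mpr (by nlinarith)
    have hfmy : fm ≤ y := by
      by_contra hc
      have : y + 1 ≤ fm := by omega
      have := (hfmle (y + 1)).mp this
      nlinarith
    constructor
    · rw [hL]; split_ifs <;> omega
    · rw [hU]; split_ifs <;> omega
  congr 1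
  by_cases hLU : L ≤ U + 1
  · have hU1 : U + 1 ≤ max_in + 1 := by omega
    rw [PySem.List.pyRange_one_append min_in L (max_in + 1) hLmin (by omega),
      PySem.List.pyRange_one_append L (U + 1) (max_in + 1) hLU hU1,
      List.filter_append, List.filter_append]
    have h1 : (PySem.List.pyRange min_in L 1).filter
        (fun y => decide (min_out ≤ x * y ∧ x * y ≤ max_out)) = [] := by
      rw [List.filter_eq_nil_iff]
      intro y hy
      rw [PySem.List.mem_pyRange_one] at hy
      simp only [decide_eq_true_eq, not_and]
      intro h1c h2c
      exact absurd (hin y h1c h2c (by omega) (by omega)).1 (by omega)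
    have h2 : (PySem.List.pyRange (U + 1) (max_in + 1) 1).filter
        (fun y => decide (min_out ≤ x * y ∧ x * y ≤ max_out)) = [] := by
      rw [List.filter_eq_nil_iff]
      intro y hy
      rw [PySem.List.mem_pyRange_one] at hy
      simp only [decide_eq_true_eq, not_and]
      intro h1c h2c
      exact absurd (hin y h1c h2c (by omega) (by omega)).2 (by omega)
    rw [h1, h2]; simp
  · rw [show PySem.List.pyRange L (U + 1) 1 = [] from
      PySem.List.pyRange_one_eq_nil (by omega)]
    rw [List.filter_nil, eq_comm, List.filter_eq_nil_iff]
    intro y hy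
    rw [PySem.List.mem_pyRange_one] at hy
    simp only [decide_eq_true_eq, not_and]
    intro h1c h2c
    have := hin y h1c h2c (by omega) (by omega)
    omega

-- the while loop of A equals B's flatMap over the x range
lemma outer_eq (min_in max_in min_out max_out : Int) (hmin : 0 < min_in) :
    ∀ (n : Nat) (x : Int), min_in ≤ x → (max_in + 1 - x).toNat ≤ n →
      truthOuterA min_in max_in min_out max_out x =
        (PySem.List.pyRange x (max_in + 1) 1).flatMap (fun x =>
          ((PySem.List.pyRange min_in (max_in + 1) 1).filter
            (fun y => decide (min_out ≤ x * y ∧ x * y ≤ max_out))).map (fun y => (x, y))) := by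
  intro n
  induction n with
  | zero =>
    intro x hx hn
    rw [truthOuterA, dif_neg (by omega),
      show PySem.List.pyRange x (max_in + 1) 1 = [] from PySem.List.pyRange_one_eq_nil (by omega)]
    rfl
  | succ n ih =>
    intro x hx hn
    by_cases hle : x ≤ max_in
    · rw [truthOuterA, dif_pos hle,
        PySem.List.pyRange_one_cons (show x < max_in + 1 by omega), List.flatMap_cons,
        perx_eq min_in max_in min_out max_out x (by omega),
        ih (x + 1) (by omega) (by omega)]
    · rw [truthOuterA, dif_neg hle,
        show PySem.List.pyRange x (max_in + 1) 1 = [] from PySem.List.pyRange_one_eq_nil (by omega)]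
      rfl

-- ===== VERDICT (by name: the statement is the Claim_ definition above) =====
theorem truth_scope_spec : Claim_equal_truth_scope := by
  intro d r _hd hpre
  obtain ⟨h1, h2, h3, h4, h5⟩ := hpre
  show truth_scope d r = truth_scope_alt d r
  unfold truth_scope truth_scope_alt
  simp only []
  rw [if_neg (by omega), if_neg (by omega), if_neg (by push Not; omega)]
  rw [if_neg (by omega), if_neg (by omega), if_neg (by push Not; omega)]
  exact outer_eq d.1 d.2 r.1 r.2 h1 (d.2 + 1 - d.1).toNat d.1 le_rfl le_rfl
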